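-- pv_equiv track=rewrite | github.com/quantum-guardians/mr2s-module | tests/cycle/partition_visualization.py | _best_face_owner
-- ===== SOURCE A (Python) =====
-- def _best_face_owner(
--     face_edges: set[tuple[int, int]],
--     macro_edge_ids: list[set[tuple[int, int]]],
-- ) -> int | None:
--     scored = [
--         (len(face_edges.intersection(edge_ids)), -macro_id, macro_id)
--         for macro_id, edge_ids in enumerate(macro_edge_ids)
--     ]
--     if not scored:
--         return None
--     best_count, _, best_macro = max(scored)
--     if best_count == 0:
--         return None
--     return best_macro
-- ===== SOURCE B (Python) =====
-- def _best_face_owner(face_edges, macro_edge_ids):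
--     # Inverted index: map each edge to the macro ids owning it, then count
--     # votes per macro over the face's edges and return the voted macro id
--     # maximizing (vote count, -id); no votes at all means no owner.
--     owners = {}
--     for mid, edges in enumerate(macro_edge_ids):
--         for e in edges:
--             owners.setdefault(e, []).append(mid)
--     votes = {}
--     for e in face_edges:
--         for mid in owners.get(e, ()):
--             votes[mid] = votes.get(mid, 0) + 1
--     if not votes:
--         return None
--     return max(votes, key=lambda m: (votes[m], -m))
-- ===== Notes on version B (the rewrite author's own statement) =====
-- stated objective: alternative
-- what changed: Instead of scoring every macro by a set intersection and taking the max of (count, -id, id) tuples, B builds an inverted edge-to-owner-ids index, counts votes per macro id by walking the face's edges through that index, and returns the (count, -id)-keyed max over the voted ids (empty vote dict means None).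
import Mathlib
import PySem

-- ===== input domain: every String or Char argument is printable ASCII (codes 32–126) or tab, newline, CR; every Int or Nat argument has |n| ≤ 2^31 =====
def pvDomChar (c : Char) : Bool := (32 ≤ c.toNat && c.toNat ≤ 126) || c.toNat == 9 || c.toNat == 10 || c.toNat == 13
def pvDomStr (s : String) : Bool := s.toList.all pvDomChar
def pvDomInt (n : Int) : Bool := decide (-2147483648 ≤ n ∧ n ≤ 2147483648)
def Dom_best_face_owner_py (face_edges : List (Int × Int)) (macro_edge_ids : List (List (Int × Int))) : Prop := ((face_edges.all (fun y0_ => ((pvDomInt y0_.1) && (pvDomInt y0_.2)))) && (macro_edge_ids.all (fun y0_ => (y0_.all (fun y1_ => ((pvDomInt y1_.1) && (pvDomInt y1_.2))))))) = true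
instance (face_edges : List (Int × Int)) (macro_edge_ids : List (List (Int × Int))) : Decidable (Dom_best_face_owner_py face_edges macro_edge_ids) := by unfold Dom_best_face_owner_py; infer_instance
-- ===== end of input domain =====

-- B replaces A's per-macro set intersections + lexicographic tuple max by an
-- inverted edge→owners index, a vote dictionary built by walking the face's
-- edges, and a keyed max over the voted ids (objective: alternative algorithm).

-- ===== PORT A =====
-- Python's `max` over the (count, -id, id) tuples, ported as a left fold that
-- replaces the current maximum exactly when the new tuple is lexicographically
-- greater (CPython keeps the first maximal element; exact here).
def pvLexGt (x y : Int × Int × Int) : Bool :=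
  decide (x.1 > y.1 ∨ (x.1 = y.1 ∧ (x.2.1 > y.2.1 ∨ (x.2.1 = y.2.1 ∧ x.2.2 > y.2.2))))

def best_face_owner_py (face_edges : List (Int × Int)) (macro_edge_ids : List (List (Int × Int))) : Option Int :=
  -- len(face_edges.intersection(edge_ids)) = number of (distinct) face edges lying in edge_ids
  let scored : List (Int × Int × Int) :=
    (PySem.List.enumerate macro_edge_ids).map (fun p =>
      (((face_edges.filter (fun e => p.2.contains e)).length : Int), -p.1, p.1))
  match scored with
  | [] => none
  | x :: xs =>
    let best := xs.foldl (fun m y => if pvLexGt y m then y else m) x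
    if best.1 = 0 then none else some best.2.2

-- ===== PORT B =====
-- `owners`: the inverted index; owners.setdefault(e, []).append(mid) is Dict.modify e [] (· ++ [mid])
def pvOwners (macro_edge_ids : List (List (Int × Int))) : PySem.Dict (Int × Int) (List Int) :=
  (PySem.List.enumerate macro_edge_ids).foldl
    (fun d p => p.2.foldl (fun d e => d.modify e [] (fun l => l ++ [p.1])) d)
    PySem.Dict.empty

-- `votes`: votes[mid] = votes.get(mid, 0) + 1 over the owners of each face edge
def pvVotes (face_edges : List (Int × Int)) (macro_edge_ids : List (List (Int × Int))) : PySem.Dict Int Int :=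
  face_edges.foldl
    (fun v e => ((pvOwners macro_edge_ids).getD e []).foldl
      (fun v mid => v.insert mid (v.getD mid 0 + 1)) v)
    PySem.Dict.empty

def best_face_owner_py_alt (face_edges : List (Int × Int)) (macro_edge_ids : List (List (Int × Int))) : Option Int :=
  match (pvVotes face_edges macro_edge_ids).keys with   -- `if not votes: return None`
  | [] => none
  | _ :: _ =>                                           -- max(votes, key=lambda m: (votes[m], -m))
    PySem.List.max2? (pvVotes face_edges macro_edge_ids).keys
      (fun m => (pvVotes face_edges macro_edge_ids).getD m 0) (fun m => -m)

-- ===== PRECONDITION & SPEC =====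
-- Both Python parameters are sets (set[tuple[int,int]] and list[set[...]]); under the
-- type convention a set is a list of DISTINCT elements, and Pre_ states exactly that
-- convention for the inner sets (the proof needs it; Python A can never receive a
-- duplicate inside a set, so no input of A is excluded).
def Pre_best_face_owner_py (face_edges : List (Int × Int)) (macro_edge_ids : List (List (Int × Int))) : Prop :=
  ∀ s ∈ macro_edge_ids, s.Nodup
instance (face_edges : List (Int × Int)) (macro_edge_ids : List (List (Int × Int))) : Decidable (Pre_best_face_owner_py face_edges macro_edge_ids) := by unfold Pre_best_face_owner_py; infer_instance

def pvWitness_best_face_owner_py : (List (Int × Int)) × (List (List (Int × Int))) :=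
  ([(0, 1), (1, 2)], [[(0, 1)], [(1, 2), (0, 1)]])

def Spec_best_face_owner_py (face_edges : List (Int × Int)) (macro_edge_ids : List (List (Int × Int))) (out : Option Int) : Prop := out = best_face_owner_py_alt face_edges macro_edge_ids
instance (face_edges : List (Int × Int)) (macro_edge_ids : List (List (Int × Int))) (out : Option Int) : Decidable (Spec_best_face_owner_py face_edges macro_edge_ids out) := by unfold Spec_best_face_owner_py; infer_instance

-- ===== CLAIM (what is proved, stated in full; the proofs are below) =====
def Claim_equal_best_face_owner_py : Prop := ∀ (face_edges : List (Int × Int)) (macro_edge_ids : List (List (Int × Int))), Dom_best_face_owner_py face_edges macro_edge_ids → Pre_best_face_owner_py face_edges macro_edge_ids → Spec_best_face_owner_py face_edges macro_edge_ids (best_face_owner_py face_edges macro_edge_ids)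

-- ===== LEMMAS AND PROOFS =====

-- A nodup list filtered for equality with a value is that value's singleton or empty
theorem pv_filter_beq_nodup (l : List (Int × Int)) (hl : l.Nodup) (a : Int × Int) :
    l.filter (fun x => x == a) = if a ∈ l then [a] else [] := by
  induction l with
  | nil => simp
  | cons b l ih =>
    simp only [List.nodup_cons] at hl
    rw [List.filter_cons]
    by_cases hba : b = a
    · subst hba
      simp only [BEq.rfl, if_pos, List.mem_cons, true_or]
      rw [ih hl.2]
      simp [hl.1]
    · have : (b == a) = false := by simp [hba]
      rw [this]
      simp only [Bool.false_eq_true, if_false]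
      rw [ih hl.2]
      simp [List.mem_cons, Ne.symm hba]

-- the flattened (edge, id) stream filtered for one edge yields the owning ids in order
theorem pv_flat_filter (E : List (Int × List (Int × Int))) (hE : ∀ p ∈ E, p.2.Nodup)
    (e : Int × Int) :
    ((E.flatMap (fun p => p.2.map (fun x => (x, p.1)))).filter (fun q => q.1 == e)).map
        (fun q => q.2)
      = (E.filter (fun q => q.2.contains e)).map (fun q => q.1) := by
  induction E with
  | nil => simp
  | cons p E ih =>
    have hp2 : p.2.Nodup := hE p (List.mem_cons_self)
    simp only [List.flatMap_cons, List.filter_append, List.map_append, List.filter_cons]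
    rw [ih (fun q hq => hE q (List.mem_cons_of_mem _ hq))]
    have hhead : ((p.2.map (fun x => (x, p.1))).filter (fun q => q.1 == e)).map
        (fun q => q.2) = if p.2.contains e then [p.1] else [] := by
      rw [List.filter_map]
      simp only [List.map_map, Function.comp_def]
      rw [pv_filter_beq_nodup p.2 hp2 e]
      by_cases he : e ∈ p.2
      · rw [if_pos he, if_pos (by simpa [List.contains_iff_mem] using he)]
        rfl
      · rw [if_neg he, if_neg (by simpa [List.contains_iff_mem] using he)]
        rfl
    rw [hhead]
    by_cases hc : p.2.contains e
    · rw [if_pos hc, if_pos hc]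
      rfl
    · rw [if_neg hc, if_neg hc]
      rfl

-- the inverted index built by B: owners[e] lists the (enumerate) indices whose
-- edge set contains e, in index order
theorem pv_owners_getD (E : List (Int × List (Int × Int))) (hE : ∀ p ∈ E, p.2.Nodup)
    (e : Int × Int) :
    (E.foldl (fun d p => p.2.foldl (fun d x => d.modify x [] (fun l => l ++ [p.1])) d)
        PySem.Dict.empty).getD e []
      = (E.filter (fun q => q.2.contains e)).map (fun q => q.1) := by
  have hflat : E.foldl (fun d p => p.2.foldl (fun d x => d.modify x [] (fun l => l ++ [p.1])) d)
        PySem.Dict.empty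
      = (E.flatMap (fun p => p.2.map (fun x => (x, p.1)))).foldl
          (fun d q => d.modify q.1 [] (fun l => l ++ [q.2])) PySem.Dict.empty := by
    rw [List.foldl_flatMap]
    simp only [List.foldl_map]
  rw [hflat, PySem.Dict.getD_foldl_modify_append]
  have hempty : (PySem.Dict.empty : PySem.Dict (Int × Int) (List Int)).getD e [] = [] := rfl
  rw [hempty, List.nil_append]
  exact pv_flat_filter E hE e

-- counting an index in the flattened vote list: one vote per face edge it owns
theorem pv_count_map_fst_filter (P : List (Int × List (Int × Int)))
    (hP : P.Pairwise (fun a b => a.1 < b.1)) (φ : Int × List (Int × Int) → Bool)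
    (p : Int × List (Int × Int)) (hp : p ∈ P) :
    ((P.filter φ).map (fun q => q.1)).count p.1 = if φ p then 1 else 0 := by
  induction P with
  | nil => cases hp
  | cons q P ih =>
    obtain ⟨hq, hP'⟩ := List.pairwise_cons.mp hP
    have hcount0 : ∀ (i : Int), (∀ r ∈ P, i < r.1) →
        ((P.filter φ).map (fun q => q.1)).count i = 0 := by
      intro i hi
      rw [List.count_eq_zero]
      intro hmem
      obtain ⟨r, hr, hri⟩ := List.mem_map.mp hmem
      exact absurd hri.symm (ne_of_lt (hi r (List.mem_of_mem_filter hr)))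
    rcases List.mem_cons.mp hp with rfl | hpP
    · rw [List.filter_cons]
      by_cases hφ : φ p
      · rw [if_pos hφ, if_pos hφ]
        simp only [List.map_cons]
        rw [List.count_cons_self, hcount0 p.1 (fun r hr => hq r hr)]
      · simp only [hφ, Bool.false_eq_true, if_false]
        exact hcount0 p.1 (fun r hr => hq r hr)
    · have hne : p.1 ≠ q.1 := (ne_of_lt (hq p hpP)).symm
      rw [List.filter_cons]
      by_cases hφq : φ q
      · rw [if_pos hφq]
        simp only [List.map_cons]
        rw [List.count_cons_of_ne (by simpa using hne.symm)]
        exact ih hP' hpP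
      · simp only [hφq, Bool.false_eq_true, if_false]
        exact ih hP' hpP

-- a 0/1 map-sum counts the filtered elements
theorem pv_sum_ite (fe : List (Int × Int)) (q : Int × Int → Bool) :
    (fe.map (fun e => if q e then 1 else 0)).sum = (fe.filter q).length := by
  induction fe with
  | nil => rfl
  | cons e fe ih =>
    simp only [List.map_cons, List.sum_cons, List.filter_cons]
    by_cases hq : q e
    · rw [if_pos hq, if_pos hq, List.length_cons, ih]
      omega
    · simp only [hq, Bool.false_eq_true, if_false]
      omega

-- Python max(xs, key=lambda m: (k1(m), k2(m))) on a nonempty list: a member that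
-- is lexicographically maximal for the pair key
theorem pv_max2_spec (k1 k2 : Int → Int) :
    ∀ (ks : List Int) (m : Int),
    ∃ r, PySem.List.max2? (m :: ks) k1 k2 = some r ∧ r ∈ m :: ks ∧
      ∀ y ∈ m :: ks, k1 y < k1 r ∨ (k1 y = k1 r ∧ k2 y ≤ k2 r) := by
  intro ks
  induction ks with
  | nil =>
    intro m
    refine ⟨m, rfl, List.mem_cons_self, ?_⟩
    intro y hy
    rcases List.mem_cons.mp hy with rfl | h
    · omega
    · cases h
  | cons x ks ih =>
    intro m
    by_cases hb : (decide (k1 m < k1 x) || (!decide (k1 x < k1 m) && decide (k2 m < k2 x))) = true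
    · have hstep : PySem.List.max2? (m :: x :: ks) k1 k2 = PySem.List.max2? (x :: ks) k1 k2 := by
        unfold PySem.List.max2?
        rw [List.foldl_cons, List.foldl_cons, List.foldl_cons]
        congr 1
        show (if (decide (k1 m < k1 x) || (!decide (k1 x < k1 m) && decide (k2 m < k2 x))) = true
              then some x else some m) = some x
        rw [if_pos hb]
      rw [hstep]
      obtain ⟨r, hr, hmem, hmax⟩ := ih x
      have hb' : k1 m < k1 x ∨ (¬ k1 x < k1 m ∧ k2 m < k2 x) := by
        simpa [Bool.or_eq_true, Bool.and_eq_true, decide_eq_true_eq] using hb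
      refine ⟨r, hr, List.mem_cons_of_mem _ hmem, ?_⟩
      intro y hy
      rcases List.mem_cons.mp hy with rfl | hy'
      · have hx := hmax x List.mem_cons_self
        omega
      · exact hmax y hy'
    · have hstep : PySem.List.max2? (m :: x :: ks) k1 k2 = PySem.List.max2? (m :: ks) k1 k2 := by
        unfold PySem.List.max2?
        rw [List.foldl_cons, List.foldl_cons, List.foldl_cons]
        congr 1
        show (if (decide (k1 m < k1 x) || (!decide (k1 x < k1 m) && decide (k2 m < k2 x))) = true
              then some x else some m) = some m
        rw [if_neg hb]
      rw [hstep]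
      obtain ⟨r, hr, hmem, hmax⟩ := ih m
      have hb' : k1 x ≤ k1 m ∧ (k1 m ≤ k1 x → k2 x ≤ k2 m) := by
        simpa [Bool.or_eq_true, Bool.and_eq_true, decide_eq_true_eq, not_or] using hb
      refine ⟨r, hr, ?_, ?_⟩
      · rcases List.mem_cons.mp hmem with rfl | h
        · exact List.mem_cons_self
        · exact List.mem_cons_of_mem _ (List.mem_cons_of_mem _ h)
      · intro y hy
        rcases List.mem_cons.mp hy with rfl | hy'
        · exact hmax y List.mem_cons_self
        · rcases List.mem_cons.mp hy' with rfl | h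
          · have hm := hmax m List.mem_cons_self
            omega
          · exact hmax y (List.mem_cons_of_mem _ h)

-- A's fold over the scored tuples: a member that is lexicographically maximal
theorem pv_lexmax_spec (xs : List (Int × Int × Int)) (x : Int × Int × Int) :
    (xs.foldl (fun m y => if pvLexGt y m then y else m) x) ∈ x :: xs ∧
      ∀ y ∈ x :: xs, pvLexGt y (xs.foldl (fun m y => if pvLexGt y m then y else m) x) = false := by
  induction xs generalizing x with
  | nil =>
    refine ⟨List.mem_cons_self, ?_⟩
    intro y hy
    rcases List.mem_cons.mp hy with rfl | h
    · simp [pvLexGt]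
    · cases h
  | cons z xs ih =>
    simp only [List.foldl_cons]
    by_cases hz : pvLexGt z x = true
    · rw [if_pos hz]
      obtain ⟨hmem, hmax⟩ := ih z
      refine ⟨?_, ?_⟩
      · rcases List.mem_cons.mp hmem with h | h
        · rw [h]; exact List.mem_cons_of_mem _ List.mem_cons_self
        · exact List.mem_cons_of_mem _ (List.mem_cons_of_mem _ h)
      · intro y hy
        rcases List.mem_cons.mp hy with rfl | hy'
        · have hzr := hmax z List.mem_cons_self
          simp only [pvLexGt, decide_eq_true_eq] at hz
          simp only [pvLexGt, decide_eq_false_iff_not] at hzr ⊢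
          omega
        · exact hmax y hy'
    · rw [if_neg hz]
      obtain ⟨hmem, hmax⟩ := ih x
      refine ⟨?_, ?_⟩
      · rcases List.mem_cons.mp hmem with h | h
        · rw [h]; exact List.mem_cons_self
        · exact List.mem_cons_of_mem _ (List.mem_cons_of_mem _ h)
      · intro y hy
        rcases List.mem_cons.mp hy with rfl | hy'
        · exact hmax y List.mem_cons_self
        · rcases List.mem_cons.mp hy' with rfl | hy'' 
          · have hxr := hmax x List.mem_cons_self
            simp only [pvLexGt, decide_eq_true_eq] at hz
            simp only [pvLexGt, decide_eq_false_iff_not] at hxr ⊢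
            omega
          · exact hmax y (List.mem_cons_of_mem _ hy'')

-- reading off A's match once the enumerate list is known
theorem pv_A_nil (fe : List (Int × Int)) (ms : List (List (Int × Int)))
    (h : PySem.List.enumerate ms 0 = []) : best_face_owner_py fe ms = none := by
  simp [best_face_owner_py, h]

theorem pv_A_cons (fe : List (Int × Int)) (ms : List (List (Int × Int)))
    (q0 : Int × List (Int × Int)) (Etl : List (Int × List (Int × Int)))
    (h : PySem.List.enumerate ms 0 = q0 :: Etl) :
    best_face_owner_py fe ms =
      (if ((Etl.map (fun p =>
            (((fe.filter (fun e => p.2.contains e)).length : Int), -p.1, p.1))).foldl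
          (fun m y => if pvLexGt y m then y else m)
          (((fe.filter (fun e => q0.2.contains e)).length : Int), -q0.1, q0.1)).1 = 0
       then none
       else some ((Etl.map (fun p =>
            (((fe.filter (fun e => p.2.contains e)).length : Int), -p.1, p.1))).foldl
          (fun m y => if pvLexGt y m then y else m)
          (((fe.filter (fun e => q0.2.contains e)).length : Int), -q0.1, q0.1)).2.2) := by
  simp only [best_face_owner_py, h, List.map_cons]

-- reading off B's match once the key list is known
theorem pv_B_nil (fe : List (Int × Int)) (ms : List (List (Int × Int)))
    (h : (pvVotes fe ms).keys = []) : best_face_owner_py_alt fe ms = none := by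
  simp [best_face_owner_py_alt, h]

theorem pv_B_cons (fe : List (Int × Int)) (ms : List (List (Int × Int)))
    (k : Int) (ks : List Int) (h : (pvVotes fe ms).keys = k :: ks) :
    best_face_owner_py_alt fe ms =
      PySem.List.max2? (k :: ks) (fun m => (pvVotes fe ms).getD m 0) (fun m => -m) := by
  simp [best_face_owner_py_alt, h]

-- ===== VERDICT (by name: the statement is the Claim_ definition above) =====
theorem best_face_owner_py_spec : Claim_equal_best_face_owner_py := by
  intro fe ms _ hpre
  unfold Spec_best_face_owner_py
  have hEnodup : ∀ p ∈ PySem.List.enumerate ms 0, p.2.Nodup := by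
    intro p hp
    obtain ⟨k, hk, rfl⟩ := (PySem.List.mem_enumerate_iff ms 0 p).mp hp
    exact hpre _ (List.getElem_mem hk)
  -- B's index and vote dictionary, characterised
  have hown : ∀ e, (pvOwners ms).getD e []
      = ((PySem.List.enumerate ms 0).filter (fun q => q.2.contains e)).map (fun q => q.1) :=
    fun e => pv_owners_getD _ hEnodup e
  have hvotes : pvVotes fe ms
      = PySem.Dict.counter (fe.flatMap (fun e =>
          ((PySem.List.enumerate ms 0).filter (fun q => q.2.contains e)).map (fun q => q.1))) := by
    unfold pvVotes
    rw [show (fun (v : PySem.Dict Int Int) (e : Int × Int) =>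
          ((pvOwners ms).getD e []).foldl (fun v mid => v.insert mid (v.getD mid 0 + 1)) v)
        = (fun (v : PySem.Dict Int Int) (e : Int × Int) =>
          (((PySem.List.enumerate ms 0).filter (fun q => q.2.contains e)).map (fun q => q.1)).foldl
            (fun v mid => v.insert mid (v.getD mid 0 + 1)) v)
      from funext fun v => funext fun e => by rw [hown e]]
    rw [← List.foldl_flatMap]
    exact PySem.Dict.foldl_insert_getD_add_one_eq_counter _
  set V : List Int := fe.flatMap (fun e =>
      ((PySem.List.enumerate ms 0).filter (fun q => q.2.contains e)).map (fun q => q.1)) with hVdef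
  have hkeys : (pvVotes fe ms).keys = PySem.Set.ofList V := by
    rw [hvotes]; exact PySem.Dict.keys_counter V
  have hgetD : ∀ m, (pvVotes fe ms).getD m 0 = (V.count m : Int) := by
    intro m; rw [hvotes]; exact PySem.Dict.getD_counter V m
  have hcount : ∀ p ∈ PySem.List.enumerate ms 0,
      V.count p.1 = (fe.filter (fun e => p.2.contains e)).length := by
    intro p hp
    rw [hVdef, List.count_flatMap]
    have hper : ∀ e, (List.count p.1 ∘ (fun e =>
        ((PySem.List.enumerate ms 0).filter (fun q => q.2.contains e)).map (fun q => q.1))) e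
        = if p.2.contains e then 1 else 0 := by
      intro e
      simp only [Function.comp_apply]
      exact pv_count_map_fst_filter _ (PySem.List.pairwise_lt_enumerate ms 0) _ p hp
    rw [List.map_congr_left (fun e _ => hper e)]
    exact pv_sum_ite fe (fun e => p.2.contains e)
  have hmemV : ∀ (i : Int), i ∈ V ↔
      ∃ p, p ∈ PySem.List.enumerate ms 0 ∧ i = p.1 ∧ ∃ e ∈ fe, p.2.contains e := by
    intro i
    constructor
    · intro hi
      obtain ⟨e, he, hi'⟩ := List.mem_flatMap.mp hi
      obtain ⟨q, hq, rfl⟩ := List.mem_map.mp hi'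
      obtain ⟨hqE, hqc⟩ := List.mem_filter.mp hq
      exact ⟨q, hqE, rfl, e, he, hqc⟩
    · rintro ⟨p, hpE, rfl, e, he, hc⟩
      exact List.mem_flatMap.mpr ⟨e, he, List.mem_map.mpr ⟨p, List.mem_filter.mpr ⟨hpE, hc⟩, rfl⟩⟩
  by_cases hVnil : V = []
  · -- no macro owns any face edge: both sides return none
    -- no macro owns any face edge: both sides return none
    have hB : best_face_owner_py_alt fe ms = none := by
      apply pv_B_nil
      rw [hkeys, hVnil]
      rfl
    have hz : ∀ p ∈ PySem.List.enumerate ms 0, (fe.filter (fun e => p.2.contains e)).length = 0 := by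
      intro p hp
      by_contra h
      obtain ⟨e, he⟩ := List.exists_mem_of_ne_nil (fe.filter (fun e => p.2.contains e))
        (fun hnil => h (by rw [hnil]; rfl))
      obtain ⟨hef, hec⟩ := List.mem_filter.mp he
      have : p.1 ∈ V := (hmemV p.1).mpr ⟨p, hp, rfl, e, hef, hec⟩
      rw [hVnil] at this
      cases this
    cases hms : PySem.List.enumerate ms 0 with
    | nil => rw [pv_A_nil fe ms hms, hB]
    | cons q0 Etl =>
      rw [pv_A_cons fe ms q0 Etl hms, hB]
      obtain ⟨hmem, _⟩ := pv_lexmax_spec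
        (Etl.map (fun p => (((fe.filter (fun e => p.2.contains e)).length : Int), -p.1, p.1)))
        (((fe.filter (fun e => q0.2.contains e)).length : Int), -q0.1, q0.1)
      rw [show ((((fe.filter (fun e => q0.2.contains e)).length : Int), -q0.1, q0.1) ::
          Etl.map (fun p => (((fe.filter (fun e => p.2.contains e)).length : Int), -p.1, p.1)))
          = (q0 :: Etl).map (fun p =>
            (((fe.filter (fun e => p.2.contains e)).length : Int), -p.1, p.1)) from rfl] at hmem
      obtain ⟨qA, hqA, hr⟩ := List.mem_map.mp hmem
      rw [← hms] at hqA
      rw [if_pos]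
      rw [← hr]
      have := hz qA hqA
      simp only []
      omega
  · -- some macro got a vote: both sides return the (count, -id)-maximal id
    obtain ⟨v0, hv0V⟩ := List.exists_mem_of_ne_nil V hVnil
    obtain ⟨p0, hp0E, hv0p, e0, he0, hc0⟩ := (hmemV v0).mp hv0V
    have hkeysne : (pvVotes fe ms).keys ≠ [] := by
      rw [hkeys]
      exact List.ne_nil_of_mem ((PySem.Set.mem_ofList _ _).mpr hv0V)
    obtain ⟨k, ks, hk⟩ := List.exists_cons_of_ne_nil hkeysne
    rw [pv_B_cons fe ms k ks hk]
    obtain ⟨rB, hrBeq, hrBmem, hrBmax⟩ :=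
      pv_max2_spec (fun m => (pvVotes fe ms).getD m 0) (fun m => -m) ks k
    rw [hrBeq]
    have hmsne : PySem.List.enumerate ms 0 ≠ [] := fun h => by rw [h] at hp0E; cases hp0E
    obtain ⟨q0, Etl, hms⟩ := List.exists_cons_of_ne_nil hmsne
    rw [pv_A_cons fe ms q0 Etl hms]
    obtain ⟨hrAmem, hrAmax⟩ := pv_lexmax_spec
      (Etl.map (fun p => (((fe.filter (fun e => p.2.contains e)).length : Int), -p.1, p.1)))
      (((fe.filter (fun e => q0.2.contains e)).length : Int), -q0.1, q0.1)
    have hconsmap : ((((fe.filter (fun e => q0.2.contains e)).length : Int), -q0.1, q0.1) ::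
        Etl.map (fun p => (((fe.filter (fun e => p.2.contains e)).length : Int), -p.1, p.1)))
        = (q0 :: Etl).map (fun p =>
          (((fe.filter (fun e => p.2.contains e)).length : Int), -p.1, p.1)) := rfl
    rw [hconsmap] at hrAmem hrAmax
    set rA := (Etl.map (fun p =>
        (((fe.filter (fun e => p.2.contains e)).length : Int), -p.1, p.1))).foldl
      (fun m y => if pvLexGt y m then y else m)
      (((fe.filter (fun e => q0.2.contains e)).length : Int), -q0.1, q0.1) with hrAdef
    obtain ⟨qA, hqA, hr⟩ := List.mem_map.mp hrAmem
    rw [← hms] at hqA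
    -- rA's count component dominates p0's, which is positive
    have hp0pos : 0 < (fe.filter (fun e => p0.2.contains e)).length :=
      List.length_pos_of_mem (List.mem_filter.mpr ⟨he0, hc0⟩)
    have hdomA := hrAmax (((fe.filter (fun e => p0.2.contains e)).length : Int), -p0.1, p0.1)
      (by rw [← hms] at hrAmax ⊢
          exact List.mem_map.mpr ⟨p0, hp0E, rfl⟩)
    have hApos : rA.1 ≠ 0 := by
      rw [← hr]
      simp only [pvLexGt, decide_eq_false_iff_not] at hdomA
      rw [← hr] at hdomA
      simp only at hdomA ⊢
      omega
    rw [if_neg hApos, ← hr]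
    simp only []
    -- rB is an index with a positive count
    have hrBV : rB ∈ V := by
      have : rB ∈ PySem.Set.ofList V := by rw [← hkeys, hk]; exact hrBmem
      exact (PySem.Set.mem_ofList _ _).mp this
    obtain ⟨pB, hpBE, hrBp, _⟩ := (hmemV rB).mp hrBV
    -- qA's id is also a key
    have hqAkey : qA.1 ∈ k :: ks := by
      rw [← hk, hkeys]
      apply (PySem.Set.mem_ofList _ _).mpr
      apply (hmemV qA.1).mpr
      refine ⟨qA, hqA, rfl, ?_⟩
      have : 0 < (fe.filter (fun e => qA.2.contains e)).length := by
        have h1 := hcount qA hqA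
        simp only [pvLexGt, decide_eq_false_iff_not] at hdomA
        rw [← hr] at hdomA
        simp only at hdomA
        omega
      obtain ⟨e, he⟩ := List.exists_mem_of_ne_nil _ (List.ne_nil_of_length_pos this)
      obtain ⟨hef, hec⟩ := List.mem_filter.mp he
      exact ⟨e, hef, hec⟩
    -- B's maximality at qA.1, A's maximality at pB's tuple
    have hBmax := hrBmax qA.1 hqAkey
    have hAmax := hrAmax (((fe.filter (fun e => pB.2.contains e)).length : Int), -pB.1, pB.1)
      (by rw [← hms] at hrAmax ⊢
          exact List.mem_map.mpr ⟨pB, hpBE, rfl⟩)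
    rw [hgetD, hgetD] at hBmax
    rw [hcount qA hqA] at hBmax
    rw [show V.count rB = (fe.filter (fun e => pB.2.contains e)).length from by
      rw [hrBp]; exact hcount pB hpBE] at hBmax
    simp only [pvLexGt, decide_eq_false_iff_not] at hAmax
    rw [← hr] at hAmax
    simp only at hAmax
    have hq2 : qA.1 = rB := by
      rw [hrBp] at hBmax ⊢
      omega
    rw [hq2]
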